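-- pv_equiv track=rewrite | github.com/gsailboat/algoithms | oneaway.py | equalsWhenOneCharRemoved
-- ===== SOURCE A (Python) =====
-- def equalsWhenOneCharRemoved(x, y):
-- 	if len(x) == len(y) + 1 or len(x) + 1 == len(y):
-- 		once = False
-- 		longer = x if len(x) > len(y) else y
-- 		shorter = x if len(x) < len(y) else y
-- 		for i,c in enumerate(shorter):
-- 			a = i + 1 if once else i
-- 			if longer[a] != c and once == False:
-- 				once = True
-- 				a += 1
-- 			if longer[a] != c and once:
-- 				return False
-- 	else:
-- 		return False
-- 	return True
-- ===== SOURCE B (Python) =====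
-- def equalsWhenOneCharRemoved(x, y):
--     if abs(len(x) - len(y)) != 1:
--         return False
--     longer, shorter = (x, y) if len(x) > len(y) else (y, x)
--     i = 0
--     while i < len(shorter) and longer[i] == shorter[i]:
--         i += 1
--     return shorter[i:] == longer[i + 1:]
-- ===== Notes on version B (the rewrite author's own statement) =====
-- stated objective: simpler
-- what changed: Replaced A's per-character loop with a `once` flag and shifted indexing by a common-prefix scan followed by a single suffix (slice) comparison after skipping one char of the longer string.
import Mathlib
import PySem

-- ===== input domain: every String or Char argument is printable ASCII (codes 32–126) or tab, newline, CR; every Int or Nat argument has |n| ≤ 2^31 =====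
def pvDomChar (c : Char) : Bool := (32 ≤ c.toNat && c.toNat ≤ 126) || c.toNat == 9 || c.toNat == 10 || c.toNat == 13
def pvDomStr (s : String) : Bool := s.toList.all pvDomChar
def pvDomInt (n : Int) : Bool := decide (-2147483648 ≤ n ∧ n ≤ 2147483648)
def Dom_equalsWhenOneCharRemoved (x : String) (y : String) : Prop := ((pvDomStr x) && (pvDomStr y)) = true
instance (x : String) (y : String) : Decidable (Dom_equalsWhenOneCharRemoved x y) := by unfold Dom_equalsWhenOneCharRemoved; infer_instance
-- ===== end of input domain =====

-- B replaces A's flag-per-character loop by a common-prefix scan plus one suffix comparison (objective: simpler).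


-- ===== PORT A =====
-- the 'for i,c in enumerate(shorter)' loop with the 'once' flag and early 'return False';
-- longer[a] is PySem.List.pyGet? (none = IndexError, unreachable under the length guard)
def pvALoop (longer : List Char) : List (Int × Char) → Bool → Bool
  | [], _ => true
  | (i, c) :: rest, once =>
    let a : Int := if once then i + 1 else i
    let p : Bool × Int :=
      if PySem.List.pyGet? longer a ≠ some c ∧ once = false then (true, a + 1) else (once, a)
    if PySem.List.pyGet? longer p.2 ≠ some c ∧ p.1 = true then false
    else pvALoop longer rest p.1

def equalsWhenOneCharRemoved (x : String) (y : String) : Bool :=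
  if x.toList.length = y.toList.length + 1 ∨ x.toList.length + 1 = y.toList.length then
    let longer := if x.toList.length > y.toList.length then x else y
    let shorter := if x.toList.length < y.toList.length then x else y
    pvALoop longer.toList (PySem.List.enumerate shorter.toList 0) false
  else false

-- ===== PORT B =====
-- the 'while i < len(shorter) and longer[i] == shorter[i]: i += 1' prefix scan
def pvPrefLen : List Char → List Char → Nat
  | l :: ls, s :: ss => if l = s then pvPrefLen ls ss + 1 else 0
  | _, _ => 0

def equalsWhenOneCharRemoved_alt (x : String) (y : String) : Bool :=
  let lx := x.toList
  let ly := y.toList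
  if ((lx.length : Int) - (ly.length : Int)).natAbs ≠ 1 then false
  else
    let p := if lx.length > ly.length then (lx, ly) else (ly, lx)
    let longer := p.1
    let shorter := p.2
    let i := pvPrefLen longer shorter
    -- shorter[i:] == longer[i+1:]  (nonnegative slices: exactly List.drop)
    shorter.drop i == longer.drop (i + 1)

-- ===== PRECONDITION & SPEC =====
def Spec_equalsWhenOneCharRemoved (x : String) (y : String) (out : Bool) : Prop := out = equalsWhenOneCharRemoved_alt x y
instance (x : String) (y : String) (out : Bool) : Decidable (Spec_equalsWhenOneCharRemoved x y out) := by unfold Spec_equalsWhenOneCharRemoved; infer_instance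

-- ===== CLAIM (what is proved, stated in full; the proofs are below) =====
def Claim_equal_equalsWhenOneCharRemoved : Prop := ∀ (x : String) (y : String), Dom_equalsWhenOneCharRemoved x y → Spec_equalsWhenOneCharRemoved x y (equalsWhenOneCharRemoved x y)

-- ===== LEMMAS AND PROOFS =====

def pvPhase2 : List Char → List Char → Bool
  | [], _ => true
  | _ :: _, [] => false
  | c :: ss, l :: ls => if c = l then pvPhase2 ss ls else false

def pvPhase1 : List Char → List Char → Bool
  | _, [] => true
  | [], _ :: _ => false
  | l :: ls, c :: ss => if l = c then pvPhase1 ls ss else pvPhase2 (c :: ss) ls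

theorem pvALoop_cons_true (L : List Char) (i : Int) (c : Char) (rest : List (Int × Char)) :
    pvALoop L ((i, c) :: rest) true =
      if PySem.List.pyGet? L (i + 1) = some c then pvALoop L rest true else false := by
  rw [pvALoop]
  simp only [Bool.true_eq_false, and_false, ite_false, and_true]
  split_ifs with h1 h2 h2 <;> simp_all

theorem pvALoop_cons_false (L : List Char) (i : Int) (c : Char) (rest : List (Int × Char)) :
    pvALoop L ((i, c) :: rest) false =
      if PySem.List.pyGet? L i = some c then pvALoop L rest false
      else if PySem.List.pyGet? L (i + 1) = some c then pvALoop L rest true else false := by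
  rw [pvALoop]
  by_cases h : PySem.List.pyGet? L i = some c
  · simp [h]
  · simp only [ne_eq, h, not_false_iff, and_true, if_neg]
    split_ifs with h1 h2 h2 <;> simp_all

theorem pvGetAppend0 (P L : List Char) :
    PySem.List.pyGet? (P ++ L) (P.length : Int) = L[0]? := by
  simpa using PySem.List.pyGet?_append_right (pre := P) (ys := L) (k := 0)

theorem pvALoop_true_eq (S : List Char) : ∀ (P L : List Char),
    pvALoop (P ++ L) (PySem.List.enumerate S ((P.length : Int) - 1)) true = pvPhase2 S L := by
  induction S with
  | nil => intro P L; simp [PySem.List.enumerate, pvALoop, pvPhase2]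
  | cons c ss ih =>
    intro P L
    rw [PySem.List.enumerate_cons, pvALoop_cons_true]
    have hi : (P.length : Int) - 1 + 1 = (P.length : Int) := by ring
    rw [hi, pvGetAppend0]
    cases L with
    | nil => simp [pvPhase2]
    | cons l ls =>
      by_cases hc : l = c
      · subst hc
        simp only [List.getElem?_cons_zero, eq_self_iff_true, if_true]
        have hP : (P.length : Int) = (((P ++ [l]).length : Nat) : Int) - 1 := by simp
        rw [hP, List.append_cons P l ls, ih (P ++ [l]) ls]
        simp [pvPhase2]
      · simp [pvPhase2, hc, Ne.symm hc]

theorem pvALoop_false_eq (S : List Char) : ∀ (P L : List Char),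
    pvALoop (P ++ L) (PySem.List.enumerate S (P.length : Int)) false = pvPhase1 L S := by
  induction S with
  | nil => intro P L; simp [PySem.List.enumerate, pvALoop, pvPhase1]
  | cons c ss ih =>
    intro P L
    rw [PySem.List.enumerate_cons, pvALoop_cons_false, pvGetAppend0]
    cases L with
    | nil =>
      have h1 : PySem.List.pyGet? P ((P.length : Int) + 1) = none := by
        simpa using PySem.List.pyGet?_append_right (pre := P) (ys := ([] : List Char)) (k := 1)
      simp [h1, pvPhase1]
    | cons l ls =>
      by_cases hc : l = c
      · subst hc
        simp only [List.getElem?_cons_zero, eq_self_iff_true, if_true]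
        have hP : (P.length : Int) + 1 = (((P ++ [l]).length : Nat) : Int) := by simp
        rw [hP, List.append_cons P l ls, ih (P ++ [l]) ls]
        simp [pvPhase1]
      · have h1 : PySem.List.pyGet? (P ++ l :: ls) ((P.length : Int) + 1) = ls[0]? := by
          have he : P ++ l :: ls = (P ++ [l]) ++ ls := by simp
          rw [he]
          simpa using pvGetAppend0 (P ++ [l]) ls
        rw [List.getElem?_cons_zero, if_neg (by simp [hc]), h1]
        cases ls with
        | nil => simp [pvPhase1, pvPhase2, hc]
        | cons l2 ls2 =>
          by_cases hc2 : l2 = c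
          · subst hc2
            simp only [List.getElem?_cons_zero, eq_self_iff_true, if_true]
            have hP2 : (P.length : Int) + 1 = ((((P ++ [l, l2]).length : Nat)) : Int) - 1 := by
              simp; ring
            have hlist : P ++ l :: l2 :: ls2 = (P ++ [l, l2]) ++ ls2 := by simp
            rw [hP2, hlist, pvALoop_true_eq ss (P ++ [l, l2]) ls2]
            simp [pvPhase1, pvPhase2, hc]
          · simp [pvPhase1, pvPhase2, hc, hc2, Ne.symm hc2]

theorem pvPhase2_eq (S L : List Char) (h : L.length = S.length) :
    pvPhase2 S L = (S == L) := by
  induction S generalizing L with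
  | nil =>
    cases L with
    | nil => simp [pvPhase2]
    | cons l ls => simp at h
  | cons c ss ih =>
    cases L with
    | nil => simp at h
    | cons l ls =>
      simp only [List.length_cons, Nat.add_right_cancel_iff] at h
      by_cases hc : c = l
      · subst hc; simp [pvPhase2, ih ls h]
      · simp [pvPhase2, hc]

theorem pvPhase1_eq (L S : List Char) (h : L.length = S.length + 1) :
    pvPhase1 L S = (S.drop (pvPrefLen L S) == L.drop (pvPrefLen L S + 1)) := by
  induction S generalizing L with
  | nil =>
    cases L with
    | nil => simp at h
    | cons l ls =>
      simp only [List.length_cons, Nat.add_right_cancel_iff] at h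
      have hnil : ls = [] := List.eq_nil_of_length_eq_zero h
      subst hnil
      simp [pvPhase1, pvPrefLen]
  | cons c ss ih =>
    cases L with
    | nil => simp at h
    | cons l ls =>
      simp only [List.length_cons, Nat.add_right_cancel_iff] at h
      by_cases hc : l = c
      · subst hc
        simp only [pvPhase1, pvPrefLen, if_pos rfl]
        rw [ih ls h]
        simp
      · have hlen : ls.length = (c :: ss).length := by simp [h]
        simp [pvPhase1, pvPrefLen, hc, pvPhase2_eq (c :: ss) ls hlen]

-- ===== VERDICT (by name: the statement is the Claim_ definition above) =====
theorem equalsWhenOneCharRemoved_spec : Claim_equal_equalsWhenOneCharRemoved := by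
  unfold Claim_equal_equalsWhenOneCharRemoved
  intro x y _
  unfold Spec_equalsWhenOneCharRemoved equalsWhenOneCharRemoved equalsWhenOneCharRemoved_alt
  set lx := x.toList with hlx
  set ly := y.toList with hly
  by_cases h1 : lx.length = ly.length + 1
  · have hgt : lx.length > ly.length := by omega
    have hlt : ¬ (lx.length < ly.length) := by omega
    have habs : ((lx.length : Int) - (ly.length : Int)).natAbs = 1 := by omega
    simp only [if_pos (Or.inl h1), if_pos hgt, if_neg hlt, habs, ne_eq, not_true_eq_false,
      if_neg, not_false_iff, if_false]
    have hA := pvALoop_false_eq ly ([] : List Char) lx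
    simp only [List.nil_append, List.length_nil, Nat.cast_zero] at hA
    rw [hA, pvPhase1_eq lx ly h1]
  · by_cases h2 : lx.length + 1 = ly.length
    · have hgt : ¬ (lx.length > ly.length) := by omega
      have hlt : lx.length < ly.length := by omega
      have habs : ((lx.length : Int) - (ly.length : Int)).natAbs = 1 := by omega
      simp only [if_pos (Or.inr h2), if_neg hgt, if_pos hlt, habs, ne_eq, not_true_eq_false,
        if_neg, not_false_iff, if_false]
      have hA := pvALoop_false_eq lx ([] : List Char) ly
      simp only [List.nil_append, List.length_nil, Nat.cast_zero] at hA
      rw [hA, pvPhase1_eq ly lx h2.symm]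
    · have habs : ¬ (((lx.length : Int) - (ly.length : Int)).natAbs ≠ 1) → False := by omega
      have habs2 : ((lx.length : Int) - (ly.length : Int)).natAbs ≠ 1 := by omega
      simp [h1, h2, habs2]
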